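-- pv_equiv track=rewrite | github.com/randovania/randovania | tools/pyspy_tools.py | remove_std_allocator
-- ===== SOURCE A (Python) =====
-- def remove_std_allocator(frame: str) -> str:
--     """
--     Remove std::allocator<...> from C++ template names.
--     Handles nested templates by counting angle brackets.
--     """
--     result = []
--     i = 0
--     while i < len(frame):
--         # Look for "std::allocator<"
--         if frame[i:].startswith("std::allocator<"):
--             # Find the matching closing >
--             depth = 1
--             j = i + len("std::allocator<")
--             while j < len(frame) and depth > 0:
--                 if frame[j] == "<":
--                     depth += 1
--                 elif frame[j] == ">":
--                     depth -= 1
--                 j += 1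
--
--             # Skip the allocator and any following comma+space
--             i = j
--             if i < len(frame) and frame[i : i + 2] == ", ":
--                 i += 2
--             elif i < len(frame) and frame[i] == ",":
--                 i += 1
--         else:
--             result.append(frame[i])
--             i += 1
--
--     return "".join(result)
-- ===== SOURCE B (Python) =====
-- def remove_std_allocator(frame: str) -> str:
--     """Remove std::allocator<...> from C++ template names (find-based segment copier)."""
--     needle = "std::allocator<"
--     parts = []
--     i = 0
--     n = len(frame)
--     while True:
--         idx = frame.find(needle, i)
--         if idx == -1:
--             parts.append(frame[i:])
--             break
--         parts.append(frame[i:idx])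
--         depth = 1
--         j = idx + len(needle)
--         while j < n and depth > 0:
--             if frame[j] == "<":
--                 depth += 1
--             elif frame[j] == ">":
--                 depth -= 1
--             j += 1
--         i = j
--         if frame[i:i + 2] == ", ":
--             i += 2
--         elif frame[i:i + 1] == ",":
--             i += 1
--     return "".join(parts)
-- ===== Notes on version B (the rewrite author's own statement) =====
-- stated objective: faster
-- what changed: Replaced the char-by-char outer scan that retries a startswith test (on a fresh suffix slice) at every index and appends one character at a time with a find-based segment copier that locates each allocator needle occurrence directly and appends whole slices between removals.
import Mathlib
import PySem

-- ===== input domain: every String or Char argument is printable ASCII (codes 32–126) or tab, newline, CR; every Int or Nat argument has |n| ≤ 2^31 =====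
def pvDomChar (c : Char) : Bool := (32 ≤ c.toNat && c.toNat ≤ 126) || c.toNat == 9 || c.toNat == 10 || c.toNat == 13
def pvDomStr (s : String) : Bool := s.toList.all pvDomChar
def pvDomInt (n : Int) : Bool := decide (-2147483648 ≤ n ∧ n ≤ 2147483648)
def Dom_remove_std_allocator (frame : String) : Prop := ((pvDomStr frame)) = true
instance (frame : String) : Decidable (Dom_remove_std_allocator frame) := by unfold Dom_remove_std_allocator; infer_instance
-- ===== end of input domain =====

-- B replaces A's char-by-char outer scan (startswith retried at every index) with a
-- find-based segment copier that appends whole slices between allocator occurrences;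
-- objective: faster (A re-slices the suffix at every index). Proved equal on all inputs.

def pvNeedle : List Char := "std::allocator<".toList

-- ===== PORT A =====
-- inner while loop: "while j < len(frame) and depth > 0: …" on the suffix at j
def pvAInner : Nat → List Char → List Char
  | _, [] => []
  | depth, c :: rest =>
    if depth == 0 then c :: rest
    else pvAInner (if c == '<' then depth + 1 else if c == '>' then depth - 1 else depth) rest

-- "if frame[i:i+2] == ', ': i += 2  elif frame[i] == ',': i += 1"
def pvASkip : List Char → List Char
  | ',' :: ' ' :: rest => rest
  | ',' :: rest => rest
  | l => l

theorem pvAInner_length (d : Nat) (l : List Char) : (pvAInner d l).length ≤ l.length := by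
  induction l generalizing d with
  | nil => simp [pvAInner]
  | cons c rest ih =>
    rw [pvAInner]
    split
    · simp
    · exact Nat.le_trans (ih _) (Nat.le_succ _)

theorem pvASkip_length (l : List Char) : (pvASkip l).length ≤ l.length := by
  rw [pvASkip.eq_def]
  split <;> simp <;> omega

-- outer while loop: result list built char by char, restarting after each removal
def pvALoop (l : List Char) : List Char :=
  match l with
  | [] => []
  | c :: rest =>
    if pvNeedle.isPrefixOf (c :: rest) then
      pvALoop (pvASkip (pvAInner 1 ((c :: rest).drop pvNeedle.length)))
    else c :: pvALoop rest
termination_by l.length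
decreasing_by
  · have h1 := pvASkip_length (pvAInner 1 ((c :: rest).drop pvNeedle.length))
    have h2 := pvAInner_length 1 ((c :: rest).drop pvNeedle.length)
    have hn : pvNeedle.length = 15 := rfl
    simp only [List.length_drop, List.length_cons] at *
    omega
  · simp

def remove_std_allocator (frame : String) : String := String.mk (pvALoop frame.toList)

-- ===== PORT B =====
-- "frame.find(needle, i)": split the suffix at the first occurrence; returns
-- (segment before the occurrence, suffix just after the needle), none if absent
def pvBFind (l : List Char) : Option (List Char × List Char) :=
  match l with
  | [] => none
  | c :: rest =>
    if pvNeedle.isPrefixOf (c :: rest) then some ([], (c :: rest).drop pvNeedle.length)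
    else
      match pvBFind rest with
      | none => none
      | some (pre, rem) => some (c :: pre, rem)

-- the same angle-bracket depth-counting inner loop, on the suffix after the needle
def pvBInner : Nat → List Char → List Char
  | _, [] => []
  | depth, c :: rest =>
    if depth == 0 then c :: rest
    else pvBInner (if c == '<' then depth + 1 else if c == '>' then depth - 1 else depth) rest

-- "if frame[i:i+2] == ', ': i += 2  elif frame[i:i+1] == ',': i += 1" (slice comparisons)
def pvBSkip (l : List Char) : List Char :=
  if l.take 2 == [',', ' '] then l.drop 2
  else if l.take 1 == [','] then l.drop 1
  else l

theorem pvBInner_length (d : Nat) (l : List Char) : (pvBInner d l).length ≤ l.length := by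
  induction l generalizing d with
  | nil => simp [pvBInner]
  | cons c rest ih =>
    rw [pvBInner]
    split
    · simp
    · exact Nat.le_trans (ih _) (Nat.le_succ _)

theorem pvBSkip_length (l : List Char) : (pvBSkip l).length ≤ l.length := by
  rw [pvBSkip]
  split <;> [skip; split] <;> simp

theorem pvBFind_some_length (l pre rem : List Char)
    (h : pvBFind l = some (pre, rem)) : rem.length < l.length := by
  induction l generalizing pre rem with
  | nil => simp [pvBFind] at h
  | cons c rest ih =>
    rw [pvBFind] at h
    split at h
    · cases h
      have hn : pvNeedle.length = 15 := rfl
      simp only [List.length_drop, List.length_cons]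
      omega
    · split at h
      · cases h
      · rename_i pre' rem' hfind
        cases h
        exact Nat.lt_trans (ih _ _ hfind) (Nat.lt_succ_self _)

-- "while True: idx = find…; copy slice; skip allocator; skip comma"
def pvBLoop (l : List Char) : List Char :=
  match hf : pvBFind l with
  | none => l
  | some (pre, rem) => pre ++ pvBLoop (pvBSkip (pvBInner 1 rem))
termination_by l.length
decreasing_by
  have h1 := pvBSkip_length (pvBInner 1 rem)
  have h2 := pvBInner_length 1 rem
  have h3 := pvBFind_some_length l pre rem hf
  omega

def remove_std_allocator_alt (frame : String) : String := String.mk (pvBLoop frame.toList)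

-- ===== PRECONDITION & SPEC =====
def Spec_remove_std_allocator (frame : String) (out : String) : Prop := out = remove_std_allocator_alt frame
instance (frame : String) (out : String) : Decidable (Spec_remove_std_allocator frame out) := by unfold Spec_remove_std_allocator; infer_instance

-- ===== CLAIM (what is proved, stated in full; the proofs are below) =====
def Claim_equal_remove_std_allocator : Prop := ∀ (frame : String), Dom_remove_std_allocator frame → Spec_remove_std_allocator frame (remove_std_allocator frame)

-- ===== LEMMAS AND PROOFS =====

theorem pvBInner_eq (d : Nat) (l : List Char) : pvBInner d l = pvAInner d l := by
  induction l generalizing d with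
  | nil => simp [pvBInner, pvAInner]
  | cons c rest ih =>
    rw [pvBInner, pvAInner]
    split
    · rfl
    · exact ih _

theorem pvBSkip_eq (l : List Char) : pvBSkip l = pvASkip l := by
  rw [pvBSkip]
  match l with
  | [] => simp [pvASkip]
  | [c] =>
    by_cases hc : c = ','
    · subst hc; simp [pvASkip]
    · simp [pvASkip.eq_def, hc]
  | c :: d :: rest =>
    by_cases hc : c = ','
    · subst hc
      by_cases hd : d = ' '
      · subst hd; simp [pvASkip]
      · simp [pvASkip.eq_def, hd]
    · simp [pvASkip.eq_def, hc]

theorem pvBLoop_none (l : List Char) (h : pvBFind l = none) : pvBLoop l = l := by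
  rw [pvBLoop.eq_def]
  split
  · rfl
  · rename_i _ _ hf
    rw [h] at hf
    cases hf

theorem pvBLoop_some (l pre rem : List Char) (h : pvBFind l = some (pre, rem)) :
    pvBLoop l = pre ++ pvBLoop (pvBSkip (pvBInner 1 rem)) := by
  rw [pvBLoop.eq_def]
  split
  · rename_i hf; rw [h] at hf; cases hf
  · rename_i pre' rem' hf
    rw [h] at hf
    cases hf
    rfl

theorem pvBLoop_cons_not_prefix (c : Char) (rest : List Char)
    (hp : ¬ pvNeedle.isPrefixOf (c :: rest)) :
    pvBLoop (c :: rest) = c :: pvBLoop rest := by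
  cases hfind : pvBFind rest with
  | none =>
    have hnone : pvBFind (c :: rest) = none := by
      rw [pvBFind]; simp [hp, hfind]
    rw [pvBLoop_none _ hnone, pvBLoop_none _ hfind]
  | some pr =>
    obtain ⟨pre, rem⟩ := pr
    have hsome : pvBFind (c :: rest) = some (c :: pre, rem) := by
      rw [pvBFind]; simp [hp, hfind]
    rw [pvBLoop_some _ _ _ hsome, pvBLoop_some _ _ _ hfind]
    simp

theorem pvLoop_eq (n : Nat) : ∀ l : List Char, l.length ≤ n → pvALoop l = pvBLoop l := by
  induction n with
  | zero =>
    intro l hl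
    have : l = [] := List.eq_nil_of_length_eq_zero (Nat.le_zero.mp hl)
    subst this
    rw [pvALoop, pvBLoop_none _ rfl]
  | succ n ih =>
    intro l hl
    match l with
    | [] => rw [pvALoop, pvBLoop_none _ rfl]
    | c :: rest =>
      by_cases hp : pvNeedle.isPrefixOf (c :: rest)
      · have hsome : pvBFind (c :: rest) = some ([], (c :: rest).drop pvNeedle.length) := by
          rw [pvBFind]; simp [hp]
        rw [pvALoop, if_pos hp, pvBLoop_some _ _ _ hsome, pvBInner_eq, pvBSkip_eq,
          List.nil_append]
        apply ih
        have h1 := pvASkip_length (pvAInner 1 ((c :: rest).drop pvNeedle.length))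
        have h2 := pvAInner_length 1 ((c :: rest).drop pvNeedle.length)
        have hn : pvNeedle.length = 15 := rfl
        simp only [List.length_drop, List.length_cons] at *
        omega
      · rw [pvALoop, if_neg hp, pvBLoop_cons_not_prefix _ _ hp]
        have := ih rest (by simp at hl; omega)
        rw [this]

-- ===== VERDICT (by name: the statement is the Claim_ definition above) =====
theorem remove_std_allocator_spec : Claim_equal_remove_std_allocator := by
  intro frame _
  unfold Spec_remove_std_allocator remove_std_allocator remove_std_allocator_alt
  rw [pvLoop_eq frame.toList.length frame.toList (Nat.le_refl _)]
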